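-- pv_equiv track=rewrite | github.com/bryant273092/Python-Projects | ile1materials/Lab 8/503826/exam.py | mutual_callers
-- ===== SOURCE A (Python) =====
-- def mutual_callers (db : {str:{str:[int]}}) -> {(str,str)}:
--     result = set()
--     calls_made = dict()
--     for caller, k in db.items():
--         for talker in k.keys():
--             if caller not in calls_made.keys():
--                 calls_made[caller] = [talker]
--             else:
--                 calls_made[caller].append(talker)
--     for a, b in calls_made.items():
--         for parse_boi in b:
--             if parse_boi in calls_made.keys():
--                 if a in calls_made[parse_boi]:
--                     if a <= parse_boi:
--                         tup = (a, parse_boi)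
--                         result.add(tup)
--     return result
-- ===== SOURCE B (Python) =====
-- def mutual_callers(db):
--     # Group directed edges by their unordered endpoint pair, recording which
--     # endpoint acted as the caller; a pair is mutual when both endpoints called
--     # (or it is a self-loop), with no per-edge reverse lookup.
--     callers_of = {}
--     for a, k in db.items():
--         for b in k:
--             key = (a, b) if a <= b else (b, a)
--             callers_of.setdefault(key, set()).add(a)
--     mutual = {p for p, cs in callers_of.items() if len(cs) == 2 or p[0] == p[1]}
--     return {(a, b) for a, k in db.items() for b in k if a <= b and (a, b) in mutual}
-- ===== Notes on version B (the rewrite author's own statement) =====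
-- stated objective: alternative
-- what changed: A checks reciprocity per edge by looking up the reverse edge (dict lookup plus a linear list-membership scan); B never looks up reverse edges: it groups the directed edges by their unordered endpoint pair recording which endpoints acted as caller, marks a pair mutual when both endpoints called (or it is a self-loop), then emits normalized pairs in a final pass.
import Mathlib
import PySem

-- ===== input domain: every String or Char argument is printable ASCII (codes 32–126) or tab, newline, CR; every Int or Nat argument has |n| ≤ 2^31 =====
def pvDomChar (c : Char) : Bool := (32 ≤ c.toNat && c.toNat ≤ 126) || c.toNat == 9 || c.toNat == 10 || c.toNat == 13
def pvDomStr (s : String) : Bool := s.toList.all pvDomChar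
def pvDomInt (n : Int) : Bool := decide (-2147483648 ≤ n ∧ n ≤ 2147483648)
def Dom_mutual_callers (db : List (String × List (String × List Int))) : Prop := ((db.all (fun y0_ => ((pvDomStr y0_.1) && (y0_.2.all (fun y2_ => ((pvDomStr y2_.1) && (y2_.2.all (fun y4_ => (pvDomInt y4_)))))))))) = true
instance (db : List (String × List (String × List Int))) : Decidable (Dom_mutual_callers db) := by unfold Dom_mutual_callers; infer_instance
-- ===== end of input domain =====

-- B replaces A's per-edge reverse-edge lookup (dict lookup + linear list scan) by grouping the
-- directed edges under their unordered endpoint pair and marking pairs both of whose endpoints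
-- called (or self-loops) as mutual (alternative algorithm, same cost class).


-- ===== PORT A =====
-- A's first loop: build calls_made, a dict caller -> list of callee names.
def buildCalls (db : List (String × List (String × List Int))) : PySem.Dict String (List String) :=
  db.foldl (fun cm ck =>
    ck.2.foldl (fun cm talker =>
      if cm.contains ck.1 = false then cm.insert ck.1 [talker.1]
      else cm.modify ck.1 [] (fun l => l ++ [talker.1])) cm) PySem.Dict.empty

-- A's second nested loop; `calls_made[parse_boi]` is read under the preceding
-- `parse_boi in calls_made.keys()` check, so getD is exact there.
def mutual_callers (db : List (String × List (String × List Int))) : List (String × String) :=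
  let calls_made := buildCalls db
  calls_made.items.foldl (fun result ab =>
    ab.2.foldl (fun result parse_boi =>
      if calls_made.contains parse_boi then
        if (calls_made.getD parse_boi []).contains ab.1 then
          if decide (ab.1 ≤ parse_boi) then PySem.Set.add result (ab.1, parse_boi)
          else result
        else result
      else result) result) PySem.Set.empty

-- ===== PORT B =====
-- literal transliteration of Source B: group edges by unordered endpoint pair recording the
-- caller endpoints (callers_of), mark mutual pairs, then one output pass over the edges.
def mutual_callers_alt (db : List (String × List (String × List Int))) : List (String × String) :=
  let callers_of : PySem.Dict (String × String) (PySem.Set String) :=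
    db.foldl (fun d ak =>
      ak.2.foldl (fun d bt =>
        d.modify (if decide (ak.1 ≤ bt.1) then (ak.1, bt.1) else (bt.1, ak.1))
          PySem.Set.empty (fun cs => PySem.Set.add cs ak.1)) d) PySem.Dict.empty
  let mutl : PySem.Set (String × String) :=
    PySem.Set.ofList ((callers_of.items.filter
      (fun pc => pc.2.length == 2 || pc.1.1 == pc.1.2)).map Prod.fst)
  db.foldl (fun result ak =>
    ak.2.foldl (fun result bt =>
      if decide (ak.1 ≤ bt.1) && mutl.contains (ak.1, bt.1)
      then PySem.Set.add result (ak.1, bt.1) else result) result) PySem.Set.empty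

-- ===== PRECONDITION & SPEC =====
-- Pre_ excludes association lists with duplicate caller keys: those do not represent any
-- Python dict input (dict keys are unique), and on them the two ports may list the same
-- mutual pairs in different orders.
def Pre_mutual_callers (db : List (String × List (String × List Int))) : Prop :=
  (db.map Prod.fst).Nodup

instance (db : List (String × List (String × List Int))) : Decidable (Pre_mutual_callers db) := by unfold Pre_mutual_callers; infer_instance

def pvWitness_mutual_callers : (List (String × List (String × List Int))) :=
  [("a", [("b", [1])]), ("b", [("a", [])])]

def Spec_mutual_callers (db : List (String × List (String × List Int))) (out : List (String × String)) : Prop := out = mutual_callers_alt db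
instance (db : List (String × List (String × List Int))) (out : List (String × String)) : Decidable (Spec_mutual_callers db out) := by unfold Spec_mutual_callers; infer_instance

-- ===== CLAIM (what is proved, stated in full; the proofs are below) =====
def Claim_equal_mutual_callers : Prop := ∀ (db : List (String × List (String × List Int))), Dom_mutual_callers db → Pre_mutual_callers db → Spec_mutual_callers db (mutual_callers db)

-- ===== LEMMAS AND PROOFS =====

def edgesOf (db : List (String × List (String × List Int))) : List (String × String) :=
  db.flatMap (fun ck => ck.2.map (fun t => (ck.1, t.1)))

lemma add_of_mem {α : Type} [BEq α] [LawfulBEq α] (s : PySem.Set α) (x : α) (h : x ∈ s) :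
    PySem.Set.add s x = s := by
  simp [PySem.Set.add, PySem.Set.contains, h]

lemma foldl_add_cons_not_mem {α : Type} [BEq α] [LawfulBEq α] (l : List α) (c : α) (s : List α)
    (h : c ∉ l) : l.foldl PySem.Set.add (c :: s) = c :: l.foldl PySem.Set.add s := by
  induction l generalizing s with
  | nil => rfl
  | cons y l ih =>
    simp at h
    have hyc : ¬ c = y := h.1
    have hc : (c :: s).contains y = s.contains y := by
      simp
      exact fun e => absurd e.symm hyc
    have hstep : PySem.Set.add (c :: s) y = c :: PySem.Set.add s y := by
      simp only [PySem.Set.add, PySem.Set.contains, hc]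
      split <;> simp
    rw [List.foldl_cons, hstep, List.foldl_cons, ih _ h.2]

lemma foldl_add_if_eq_update {α : Type} [BEq α] (p : α → Bool) (l : List α) (s : PySem.Set α) :
    l.foldl (fun s x => if p x then PySem.Set.add s x else s) s
      = PySem.Set.update s (l.filter p) := by
  induction l generalizing s with
  | nil => rfl
  | cons x l ih =>
    rw [List.foldl_cons]
    by_cases hp : p x = true
    · rw [if_pos hp, List.filter_cons_of_pos hp, ih, PySem.Set.update, PySem.Set.update,
        List.foldl_cons]
    · rw [if_neg hp, List.filter_cons_of_neg hp, ih]

-- the dict built by A's first loop, in flattened form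
def Mof (db : List (String × List (String × List Int))) : PySem.Dict String (List String) :=
  (edgesOf db).foldl (fun d p => d.modify p.1 [] (fun l => l ++ [p.2])) PySem.Dict.empty

lemma step_eq (cm : PySem.Dict String (List String)) (c t : String) :
    (if cm.contains c then cm.modify c [] (fun l => l ++ [t]) else cm.insert c [t])
      = cm.modify c [] (fun l => l ++ [t]) := by
  by_cases h : cm.contains c = true
  · simp [h]
  · simp [h, PySem.Dict.modify, PySem.Dict.getD_of_not_contains cm [] (by simpa using h)]

lemma M_getD (db : List (String × List (String × List Int))) (c : String) :
    (Mof db).getD c [] = ((edgesOf db).filter (fun p => p.1 == c)).map (fun x => x.2) := by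
  simpa using PySem.Dict.getD_foldl_modify_append (edgesOf db) PySem.Dict.empty c

lemma M_keys (db : List (String × List (String × List Int))) :
    (Mof db).keys = PySem.Set.ofList ((edgesOf db).map Prod.fst) := by
  have h := PySem.Dict.keys_foldl_modify_key (edgesOf db) Prod.fst []
    (fun _ p => fun l => l ++ [p.2]) PySem.Dict.empty
  simpa [PySem.Set.ofList] using h

lemma M_nodup (db : List (String × List (String × List Int))) : (Mof db).keys.Nodup := by
  exact PySem.Dict.nodup_keys_foldl_modify_key _ _ _ _ _ (by simp [PySem.Dict.keys, PySem.Dict.empty])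

lemma mem_getD_iff (db : List (String × List (String × List Int))) (a p : String) :
    a ∈ (Mof db).getD p [] ↔ (p, a) ∈ edgesOf db := by
  rw [M_getD]
  simp only [List.mem_map, List.mem_filter, beq_iff_eq]
  constructor
  · rintro ⟨⟨q1, q2⟩, ⟨hq, rfl⟩, rfl⟩; exact hq
  · intro h; exact ⟨(p, a), ⟨h, rfl⟩, rfl⟩

lemma M_contains_iff (db : List (String × List (String × List Int))) (p : String) :
    (Mof db).contains p = true ↔ p ∈ (edgesOf db).map Prod.fst := by
  rw [PySem.Dict.contains_iff_mem_keys, M_keys, PySem.Set.mem_ofList]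

lemma fst_edges_mem (db : List (String × List (String × List Int))) (x : String)
    (h : x ∈ (edgesOf db).map Prod.fst) : x ∈ db.map Prod.fst := by
  simp only [edgesOf] at h
  obtain ⟨e, he, rfl⟩ := List.mem_map.mp h
  obtain ⟨ck, hck, hem⟩ := List.mem_flatMap.mp he
  obtain ⟨t, _, rfl⟩ := List.mem_map.mp hem
  exact List.mem_map.mpr ⟨ck, hck, rfl⟩

lemma foldl_add_const {α : Type} [BEq α] [LawfulBEq α] (ks : List (String × List Int)) (c : α)
    (s : List α) (h : c ∈ s) : (ks.map (fun _ => c)).foldl PySem.Set.add s = s := by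
  induction ks with
  | nil => rfl
  | cons k ks ih => rw [List.map_cons, List.foldl_cons, add_of_mem s c h]; exact ih

lemma group (db : List (String × List (String × List Int)))
    (h : (db.map Prod.fst).Nodup) :
    (PySem.Set.ofList ((edgesOf db).map Prod.fst)).flatMap
        (fun k => (edgesOf db).filter (fun p => p.1 == k)) = edgesOf db := by
  induction db with
  | nil => rfl
  | cons ck rest ih =>
    obtain ⟨c, ks⟩ := ck
    simp only [List.map_cons, List.nodup_cons] at h
    obtain ⟨hc, hrest⟩ := h
    have hcEr : c ∉ (edgesOf rest).map Prod.fst := fun m => hc (fst_edges_mem rest c m)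
    have hE : edgesOf ((c, ks) :: rest) = ks.map (fun t => (c, t.1)) ++ edgesOf rest := by
      simp [edgesOf]
    have hfst : (ks.map (fun t => (c, t.1))).map Prod.fst = ks.map (fun _ => c) := by
      rw [List.map_map]; rfl
    cases ks with
    | nil => simpa [hE] using ih hrest
    | cons k0 ks' =>
      have hofl : PySem.Set.ofList ((edgesOf ((c, k0 :: ks') :: rest)).map Prod.fst)
          = c :: PySem.Set.ofList ((edgesOf rest).map Prod.fst) := by
        rw [hE, List.map_append, hfst]
        show (((k0 :: ks').map (fun _ => c)) ++ (edgesOf rest).map Prod.fst).foldl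
          PySem.Set.add PySem.Set.empty = _
        rw [List.foldl_append, List.map_cons, List.foldl_cons]
        have h1 : PySem.Set.add (PySem.Set.empty : PySem.Set String) c = [c] := rfl
        rw [h1, foldl_add_const ks' c [c] (by simp),
          foldl_add_cons_not_mem _ _ _ hcEr]
        rfl
      have hblk : ((k0 :: ks').map (fun t => (c, t.1))).filter (fun p => p.1 == c)
          = (k0 :: ks').map (fun t => (c, t.1)) := by
        apply List.filter_eq_self.mpr
        intro p hp
        simp only [List.mem_map] at hp
        obtain ⟨t, _, rfl⟩ := hp
        simp
      have hErnil : (edgesOf rest).filter (fun p => p.1 == c) = [] := by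
        apply List.filter_eq_nil_iff.mpr
        intro p hp
        simp only [beq_iff_eq]
        intro e
        exact hcEr (List.mem_map.mpr ⟨p, hp, e⟩)
      rw [hofl, List.flatMap_cons, hE, List.filter_append, hblk, hErnil, List.append_nil]
      congr 1
      have hptw : ∀ x ∈ PySem.Set.ofList ((edgesOf rest).map Prod.fst),
          ((k0 :: ks').map (fun t => (c, t.1)) ++ edgesOf rest).filter (fun p => p.1 == x)
            = (edgesOf rest).filter (fun p => p.1 == x) := by
        intro x hx
        have hxc : x ≠ c := by
          rintro rfl
          exact hcEr ((PySem.Set.mem_ofList _ _).mp hx)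
        rw [List.filter_append]
        have : ((k0 :: ks').map (fun t => (c, t.1))).filter (fun p => p.1 == x) = [] := by
          apply List.filter_eq_nil_iff.mpr
          intro p hp
          simp only [List.mem_map] at hp
          obtain ⟨t, _, rfl⟩ := hp
          simp [hxc.symm]
        rw [this, List.nil_append]
      calc (PySem.Set.ofList ((edgesOf rest).map Prod.fst)).flatMap
            (fun k => ((k0 :: ks').map (fun t => (c, t.1)) ++ edgesOf rest).filter (fun p => p.1 == k))
          = (PySem.Set.ofList ((edgesOf rest).map Prod.fst)).flatMap
            (fun k => (edgesOf rest).filter (fun p => p.1 == k)) := by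
            exact List.flatMap_congr hptw
        _ = edgesOf rest := ih hrest

lemma items_flat (db : List (String × List (String × List Int)))
    (h : (db.map Prod.fst).Nodup) :
    (Mof db).items.flatMap (fun ab => ab.2.map (fun pb => (ab.1, pb))) = edgesOf db := by
  rw [PySem.Dict.items_eq_map_keys (Mof db) (M_nodup db) [], List.flatMap_map, M_keys]
  have hpt : ∀ k : String, ((Mof db).getD k []).map (fun pb => (k, pb))
      = (edgesOf db).filter (fun p => p.1 == k) := by
    intro k
    rw [M_getD, List.map_map]
    calc ((edgesOf db).filter (fun p => p.1 == k)).map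
          ((fun pb => (k, pb)) ∘ (fun x => x.2))
        = ((edgesOf db).filter (fun p => p.1 == k)).map id := by
          apply List.map_congr_left
          intro p hp
          have hpk : p.1 = k := by simpa using (List.mem_filter.mp hp).2
          simp [← hpk]
      _ = (edgesOf db).filter (fun p => p.1 == k) := List.map_id _
  simp only [hpt]
  exact group db h

lemma res_step (db : List (String × List (String × List Int)))
    (r : PySem.Set (String × String)) (q : String × String) :
    (if (Mof db).contains q.2 then
       if ((Mof db).getD q.2 []).contains q.1 then
         if decide (q.1 ≤ q.2) then PySem.Set.add r q else r
       else r
     else r)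
    = if (decide ((q.2, q.1) ∈ edgesOf db) && decide (q.1 ≤ q.2)) then PySem.Set.add r q
      else r := by
  by_cases hm : (q.2, q.1) ∈ edgesOf db
  · have h1 : (Mof db).contains q.2 = true :=
      (M_contains_iff db q.2).mpr (List.mem_map.mpr ⟨(q.2, q.1), hm, rfl⟩)
    have h2 : q.1 ∈ (Mof db).getD q.2 [] := (mem_getD_iff db q.1 q.2).mpr hm
    simp [h1, h2, hm]
  · have h2 : q.1 ∉ (Mof db).getD q.2 [] :=
      fun hmem => hm ((mem_getD_iff db q.1 q.2).mp hmem)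
    by_cases h1 : (Mof db).contains q.2 = true <;> simp [h1, h2, hm]

lemma buildCalls_eq (db : List (String × List (String × List Int))) :
    buildCalls db = Mof db := by
  rw [buildCalls, Mof, edgesOf, List.foldl_flatMap]
  apply PySem.List.foldl_congr_mem
  intro cm ck _
  rw [List.foldl_map]
  apply PySem.List.foldl_congr_mem
  intro cm' t _
  rw [← step_eq cm' ck.1 t.1]
  by_cases hc : cm'.contains ck.1 = true <;> simp [hc]

lemma hA (db : List (String × List (String × List Int)))
    (h : (db.map Prod.fst).Nodup) :
    mutual_callers db = PySem.Set.ofList ((edgesOf db).filter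
      (fun q => decide ((q.2, q.1) ∈ edgesOf db) && decide (q.1 ≤ q.2))) := by
  show (buildCalls db).items.foldl (fun result ab =>
    ab.2.foldl (fun result parse_boi =>
      if (buildCalls db).contains parse_boi then
        if ((buildCalls db).getD parse_boi []).contains ab.1 then
          if decide (ab.1 ≤ parse_boi) then PySem.Set.add result (ab.1, parse_boi)
          else result
        else result
      else result) result) PySem.Set.empty = _
  rw [buildCalls_eq]
  have hsplit :
      (Mof db).items.foldl (fun result ab =>
        ab.2.foldl (fun result parse_boi =>
          if (Mof db).contains parse_boi then
            if ((Mof db).getD parse_boi []).contains ab.1 then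
              if decide (ab.1 ≤ parse_boi) then PySem.Set.add result (ab.1, parse_boi)
              else result
            else result
          else result) result) PySem.Set.empty
      = ((Mof db).items.flatMap (fun ab => ab.2.map (fun pb => (ab.1, pb)))).foldl
          (fun r q =>
            if (Mof db).contains q.2 then
              if ((Mof db).getD q.2 []).contains q.1 then
                if decide (q.1 ≤ q.2) then PySem.Set.add r q else r
              else r
            else r) PySem.Set.empty := by
    rw [List.foldl_flatMap]
    apply PySem.List.foldl_congr_mem
    intro acc ab _
    rw [List.foldl_map]
  rw [hsplit, items_flat db h]
  have hfun : (fun (r : PySem.Set (String × String)) (q : String × String) =>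
      if (Mof db).contains q.2 then
        if ((Mof db).getD q.2 []).contains q.1 then
          if decide (q.1 ≤ q.2) then PySem.Set.add r q else r
        else r
      else r)
      = fun r q => if (decide ((q.2, q.1) ∈ edgesOf db) && decide (q.1 ≤ q.2))
          then PySem.Set.add r q else r :=
    funext fun r => funext fun q => res_step db r q
  rw [hfun, foldl_add_if_eq_update]
  exact PySem.Set.update_nil_left _

-- ===== B-side lemmas =====

-- the unordered (normalized) key B groups an edge under
def normp (q : String × String) : String × String :=
  if q.1 ≤ q.2 then q else (q.2, q.1)

-- the callers_of dict of B's first loop, in flattened form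
def Cof (db : List (String × List (String × List Int))) :
    PySem.Dict (String × String) (PySem.Set String) :=
  (edgesOf db).foldl
    (fun d q => d.modify (normp q) PySem.Set.empty (fun cs => PySem.Set.add cs q.1))
    PySem.Dict.empty

lemma getD_foldl_modify_key_gen {κ ν β : Type} [BEq κ] [LawfulBEq κ] [DecidableEq κ]
    (l : List β) (key : β → κ) (d0 : ν) (f : β → ν → ν) (d : PySem.Dict κ ν) (k : κ) :
    (l.foldl (fun d x => d.modify (key x) d0 (f x)) d).getD k d0
      = (l.filter (fun x => key x = k)).foldl (fun v x => f x v) (d.getD k d0) := by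
  induction l generalizing d with
  | nil => rfl
  | cons x l ih =>
    rw [List.foldl_cons, ih]
    by_cases hk : key x = k
    · rw [List.filter_cons_of_pos (by simpa using hk), List.foldl_cons,
        PySem.Dict.getD_modify, if_pos hk.symm, hk]
    · rw [List.filter_cons_of_neg (by simpa using hk),
        PySem.Dict.getD_modify, if_neg (fun e => hk e.symm)]

lemma C_getD (db : List (String × List (String × List Int))) (k : String × String) :
    (Cof db).getD k PySem.Set.empty
      = PySem.Set.ofList (((edgesOf db).filter (fun q => normp q = k)).map Prod.fst) := by
  rw [Cof, getD_foldl_modify_key_gen (edgesOf db) normp PySem.Set.empty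
    (fun q cs => PySem.Set.add cs q.1) PySem.Dict.empty k]
  have hd : (PySem.Dict.empty : PySem.Dict (String × String) (PySem.Set String)).getD
      k PySem.Set.empty = PySem.Set.empty := by
    simp [PySem.Dict.getD_empty]
  rw [hd, PySem.Set.ofList, ← List.foldl_map]

lemma C_keys (db : List (String × List (String × List Int))) :
    (Cof db).keys = PySem.Set.ofList ((edgesOf db).map normp) := by
  have h := PySem.Dict.keys_foldl_modify_key (edgesOf db) normp PySem.Set.empty
    (fun _ q => fun cs => PySem.Set.add cs q.1) PySem.Dict.empty
  simpa [PySem.Set.ofList] using h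

lemma C_nodup (db : List (String × List (String × List Int))) : (Cof db).keys.Nodup := by
  exact PySem.Dict.nodup_keys_foldl_modify_key _ _ _ _ _
    (by simp [PySem.Dict.keys, PySem.Dict.empty])

lemma mem_cs_iff (db : List (String × List (String × List Int))) (k : String × String)
    (x : String) :
    x ∈ (Cof db).getD k PySem.Set.empty ↔ ∃ q ∈ edgesOf db, normp q = k ∧ q.1 = x := by
  rw [C_getD, PySem.Set.mem_ofList]
  simp only [List.mem_map, List.mem_filter, decide_eq_true_eq]
  constructor
  · rintro ⟨q, ⟨hq, hn⟩, rfl⟩; exact ⟨q, hq, hn, rfl⟩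
  · rintro ⟨q, hq, hn, rfl⟩; exact ⟨q, ⟨hq, hn⟩, rfl⟩

lemma normp_self_of_le (q : String × String) (h : q.1 ≤ q.2) : normp q = q := by
  simp [normp, h]

lemma normp_swap (q : String × String) (h : q.1 ≤ q.2) : normp (q.2, q.1) = q := by
  by_cases h2 : q.2 ≤ q.1
  · have h12 : q.1 = q.2 := le_antisymm h h2
    simp only [normp, if_pos h2]
    exact Prod.ext h12.symm h12
  · simp [normp, h2]

-- the condition B's `mut` set tests, evaluated at an edge q with q.1 ≤ q.2,
-- is exactly A's reverse-edge test
lemma mut_cond (db : List (String × List (String × List Int))) (q : String × String)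
    (hq : q ∈ edgesOf db) (hle : q.1 ≤ q.2) :
    (q ∈ (Cof db).keys ∧
      ((((Cof db).getD q PySem.Set.empty).length == 2
        || q.1 == q.2) = true))
      ↔ (q.2, q.1) ∈ edgesOf db := by
  have hkey : q ∈ (Cof db).keys := by
    rw [C_keys, PySem.Set.mem_ofList]
    exact List.mem_map.mpr ⟨q, hq, normp_self_of_le q hle⟩
  set cs := (Cof db).getD q PySem.Set.empty with hcs
  have h1 : q.1 ∈ cs := (mem_cs_iff db q q.1).mpr ⟨q, hq, normp_self_of_le q hle, rfl⟩
  have hsub : ∀ x ∈ cs, x = q.1 ∨ x = q.2 := by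
    intro x hx
    obtain ⟨e, he, hn, hfx⟩ := (mem_cs_iff db q x).mp hx
    by_cases hee : e.1 ≤ e.2
    · left; rw [normp_self_of_le e hee] at hn
      rw [← hfx, hn]
    · right; simp only [normp, if_neg hee] at hn
      rw [← hfx]
      exact congrArg Prod.snd hn
  have h2iff : q.2 ∈ cs ↔ (q.2, q.1) ∈ edgesOf db := by
    constructor
    · intro h2
      obtain ⟨e, he, hn, hfst⟩ := (mem_cs_iff db q q.2).mp h2
      by_cases hee : e.1 ≤ e.2
      · rw [normp_self_of_le e hee] at hn
        have heq : e = q := hn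
        rw [heq] at hfst
        have h12 : q.1 = q.2 := hfst
        have : q = (q.2, q.1) := Prod.ext h12 h12.symm
        rw [← this]; rw [heq] at he; exact he
      · simp only [normp, if_neg hee] at hn
        have he2 : e.2 = q.1 := congrArg Prod.fst hn
        have he1 : e.1 = q.2 := congrArg Prod.snd hn
        have : e = (q.2, q.1) := Prod.ext he1 he2
        rw [← this]; exact he
    · intro h2
      exact (mem_cs_iff db q q.2).mpr ⟨(q.2, q.1), h2, normp_swap q hle, rfl⟩
  have hnd : cs.Nodup := by
    rw [hcs, C_getD]; exact PySem.Set.nodup_ofList _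
  constructor
  · rintro ⟨-, hcond⟩
    rcases Bool.or_eq_true_iff.mp hcond with hlen | heqq
    · -- length 2 forces both endpoints present
      have hq2 : q.2 ∈ cs := by
        by_contra hq2
        have hsub1 : ∀ x ∈ cs, x = q.1 := by
          intro x hx
          rcases hsub x hx with h | h
          · exact h
          · exact absurd (h ▸ hx) hq2
        have : cs.length ≤ 1 := by
          cases hcse : cs with
          | nil => simp
          | cons a t =>
            cases hte : t with
            | nil => simp
            | cons b t2 =>
              exfalso
              rw [hcse, hte] at hnd hsub1
              have ha : a = q.1 := hsub1 a (by simp)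
              have hb : b = q.1 := hsub1 b (by simp)
              simp [ha, hb] at hnd
        have hlen2 : cs.length = 2 := by simpa using hlen
        omega
      exact h2iff.mp hq2
    · have h12 : q.1 = q.2 := by simpa using heqq
      have : (q.2, q.1) = q := Prod.ext (by simp [h12]) (by simp [h12])
      rw [this]; exact hq
  · intro hrev
    refine ⟨hkey, ?_⟩
    by_cases h12 : q.1 = q.2
    · simp [h12]
    · have hq2 : q.2 ∈ cs := h2iff.mpr hrev
      have hfin : cs.toFinset = {q.1, q.2} := by
        ext x
        simp only [List.mem_toFinset, Finset.mem_insert, Finset.mem_singleton]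
        constructor
        · exact hsub x
        · rintro (rfl | rfl)
          · exact h1
          · exact hq2
      have hcard : cs.toFinset.card = 2 := by
        rw [hfin]
        exact Finset.card_pair h12
      have hlen : cs.length = 2 := by
        rw [← List.toFinset_card_of_nodup hnd, hcard]
      simp [hlen]

lemma Cof_eq (db : List (String × List (String × List Int))) :
    db.foldl (fun d ak =>
      ak.2.foldl (fun d bt =>
        d.modify (if decide (ak.1 ≤ bt.1) then (ak.1, bt.1) else (bt.1, ak.1))
          PySem.Set.empty (fun cs => PySem.Set.add cs ak.1)) d) PySem.Dict.empty
    = Cof db := by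
  rw [Cof, edgesOf, List.foldl_flatMap]
  apply PySem.List.foldl_congr_mem
  intro d ck _
  rw [List.foldl_map]
  apply PySem.List.foldl_congr_mem
  intro d' t _
  simp [normp]

lemma hB (db : List (String × List (String × List Int))) :
    mutual_callers_alt db = PySem.Set.ofList ((edgesOf db).filter
      (fun q => decide ((q.2, q.1) ∈ edgesOf db) && decide (q.1 ≤ q.2))) := by
  rw [mutual_callers_alt]
  rw [Cof_eq]
  set mutl : PySem.Set (String × String) :=
    PySem.Set.ofList (((Cof db).items.filter
      (fun pc => pc.2.length == 2 || pc.1.1 == pc.1.2)).map Prod.fst) with hmutl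
  have hsplit :
      db.foldl (fun result ak =>
        ak.2.foldl (fun result bt =>
          if decide (ak.1 ≤ bt.1) && mutl.contains (ak.1, bt.1)
          then PySem.Set.add result (ak.1, bt.1) else result) result) PySem.Set.empty
      = (edgesOf db).foldl (fun r q =>
          if decide (q.1 ≤ q.2) && mutl.contains q then PySem.Set.add r q else r)
          PySem.Set.empty := by
    rw [edgesOf, List.foldl_flatMap]
    apply PySem.List.foldl_congr_mem
    intro acc ck _
    rw [List.foldl_map]
  rw [hsplit, foldl_add_if_eq_update]
  have hf : List.filter (fun q => decide (q.1 ≤ q.2) && mutl.contains q) (edgesOf db)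
      = List.filter (fun q => decide ((q.2, q.1) ∈ edgesOf db) && decide (q.1 ≤ q.2))
          (edgesOf db) := by
    apply List.filter_congr
    intro q hq
    by_cases hle : q.1 ≤ q.2
    · have hmem : q ∈ mutl ↔
          (q ∈ (Cof db).keys ∧
            ((((Cof db).getD q PySem.Set.empty).length == 2 || q.1 == q.2) = true)) := by
        rw [hmutl, PySem.Set.mem_ofList, PySem.Dict.items_eq_map_keys (Cof db) (C_nodup db)
          PySem.Set.empty]
        rw [List.filter_map, List.map_map, List.mem_map]
        constructor
        · rintro ⟨k, hk, rfl⟩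
          have hkk := List.mem_filter.mp hk
          exact ⟨hkk.1, by simpa using hkk.2⟩
        · rintro ⟨hk, hcond⟩
          exact ⟨q, List.mem_filter.mpr ⟨hk, by simpa using hcond⟩, rfl⟩
      have hiff := (mut_cond db q hq hle)
      by_cases hrev : (q.2, q.1) ∈ edgesOf db
      · have hmq : q ∈ mutl := hmem.mpr (hiff.mpr hrev)
        simp [hle, hrev, hmq]
      · have hmq : q ∉ mutl := fun hmq => hrev (hiff.mp (hmem.mp hmq))
        simp [hle, hrev, hmq]
    · simp [hle]
  rw [hf]
  exact PySem.Set.update_nil_left _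

-- ===== VERDICT (by name: the statement is the Claim_ definition above) =====
theorem mutual_callers_spec : Claim_equal_mutual_callers := by
  intro db _ hpre
  show mutual_callers db = mutual_callers_alt db
  rw [hA db hpre, hB db]
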